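-- pv_equiv track=rewrite | github.com/NewJiSoo/algorithm | 프로그래머스/대충만든자판.py | solution
-- ===== SOURCE A (Python) =====
-- def solution(keymap, targets):
--     dic = {}
--     for q in range(len(keymap)):
--         for w in range(len(keymap[q])):
--             if keymap[q][w] in dic:
--                 dic[keymap[q][w]].append(w+1)
--             else:
--                 dic[keymap[q][w]] = [w+1]
--
--     answer = []
--     for target in targets:
--         result = 0
--         for j in target:
--             if j in dic:
--                 result += min(dic[j])
--             else:
--                 result = -1
--                 break
--         answer.append(result)
--
--     return answer
-- ===== SOURCE B (Python) =====
-- def solution(keymap, targets):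
--     # No pre-built position dict: for each target character, scan the keymap
--     # rows directly, keeping the running minimum of (first index in row) + 1.
--     answer = []
--     for target in targets:
--         total = 0
--         for ch in target:
--             best = None
--             for row in keymap:
--                 if ch in row:
--                     p = row.index(ch) + 1
--                     if best is None or p < best:
--                         best = p
--             if best is None:
--                 total = -1
--                 break
--             total += best
--         answer.append(total)
--     return answer
-- ===== Notes on version B (the rewrite author's own statement) =====
-- stated objective: alternative
-- what changed: Drops A's pre-built char->all-positions dict (and the min over all occurrences); B instead scans the keymap rows directly per target character, combining row.index(ch)+1 of the rows containing the character with a running minimum.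
import Mathlib
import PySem

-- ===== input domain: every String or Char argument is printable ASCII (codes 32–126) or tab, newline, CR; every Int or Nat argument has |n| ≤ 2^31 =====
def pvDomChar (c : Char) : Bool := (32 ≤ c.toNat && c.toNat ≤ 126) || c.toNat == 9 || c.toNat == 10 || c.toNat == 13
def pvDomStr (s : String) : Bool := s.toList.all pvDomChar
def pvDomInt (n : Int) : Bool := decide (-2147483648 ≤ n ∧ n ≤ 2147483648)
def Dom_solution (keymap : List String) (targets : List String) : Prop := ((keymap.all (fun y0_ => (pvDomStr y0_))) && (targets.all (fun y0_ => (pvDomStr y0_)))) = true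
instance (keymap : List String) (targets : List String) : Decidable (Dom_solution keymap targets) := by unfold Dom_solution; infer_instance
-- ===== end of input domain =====

-- B drops A's pre-built char→positions dict and instead rescans the keymap rows per
-- target character with a running minimum of row.index(ch)+1 (objective: alternative;
-- same return value, no side effects).

-- ===== PORT A =====
-- the body of A's double loop: dic[c].append(w+1) / dic[c] = [w+1]
def solutionDicStep (d : PySem.Dict Char (List Int)) (w : Int) (c : Char) :
    PySem.Dict Char (List Int) :=
  if d.contains c then d.insert c (d.getD c [] ++ [w + 1]) else d.insert c [w + 1]

-- 'for q in range(len(keymap)): for w in range(len(keymap[q])): …'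
-- (keymap[q] / keymap[q][w] as pyGetD: the indices come from range(len(...)))
def solutionDic (keymap : List String) : PySem.Dict Char (List Int) :=
  (PySem.List.pyRange 0 keymap.length 1).foldl
    (fun d q =>
      (PySem.List.pyRange 0 (PySem.Str.len (PySem.List.pyGetD keymap q "")) 1).foldl
        (fun d w =>
          solutionDicStep d w (PySem.List.pyGetD (PySem.List.pyGetD keymap q "").toList w ' ')) d)
    PySem.Dict.empty

-- 'for j in target' with 'result = -1; break'; min(dic[j]) is min? (never [] here)
def solutionLoop (dic : PySem.Dict Char (List Int)) : List Char → Int → Int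
  | [], result => result
  | j :: rest, result =>
    if dic.contains j then
      solutionLoop dic rest (result + ((PySem.List.min? (dic.getD j []) (fun x => x)).getD 0))
    else -1

def solution (keymap : List String) (targets : List String) : List Int :=
  let dic := solutionDic keymap
  targets.foldl (fun answer target => answer ++ [solutionLoop dic target.toList 0]) []

-- ===== PORT B =====
-- the inner 'for row in keymap' loop of B: running minimum of row.index(ch)+1
-- ('row.index(ch)' is Str.find here, exact because it is guarded by 'ch in row')
def solutionAltBest (keymap : List String) (ch : Char) : Option Int :=
  keymap.foldl
    (fun best row =>
      if PySem.Str.isIn (String.ofList [ch]) row then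
        let p := PySem.Str.find row (String.ofList [ch]) + 1
        match best with
        | none => some p
        | some b => if p < b then some p else some b
      else best)
    none

-- 'for ch in target' with 'total = -1; break'
def solutionAltLoop (keymap : List String) : List Char → Int → Int
  | [], total => total
  | ch :: rest, total =>
    match solutionAltBest keymap ch with
    | none => -1
    | some b => solutionAltLoop keymap rest (total + b)

def solution_alt (keymap : List String) (targets : List String) : List Int :=
  targets.foldl (fun answer target => answer ++ [solutionAltLoop keymap target.toList 0]) []

-- ===== PRECONDITION & SPEC =====
def Spec_solution (keymap : List String) (targets : List String) (out : List Int) : Prop := out = solution_alt keymap targets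
instance (keymap : List String) (targets : List String) (out : List Int) : Decidable (Spec_solution keymap targets out) := by unfold Spec_solution; infer_instance

-- ===== CLAIM (what is proved, stated in full; the proofs are below) =====
def Claim_equal_solution : Prop := ∀ (keymap : List String) (targets : List String), Dom_solution keymap targets → Spec_solution keymap targets (solution keymap targets)

-- ===== LEMMAS AND PROOFS =====

-- positions (1-based, from offset n) of c in s, in order — what dic[c] accumulates
def pvOccs : List Char → Int → Char → List Int
  | [], _, _ => []
  | x :: t, n, c => if x = c then (n + 1) :: pvOccs t (n + 1) c else pvOccs t (n + 1) c

-- index of the first occurrence of c in s (meaningful when c ∈ s)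
def pvFirstIdx : List Char → Char → Nat
  | [], _ => 0
  | x :: t, c => if x = c then 0 else pvFirstIdx t c + 1

-- the running-minimum combiner of B's row loop
def pvF (best : Option Int) (p : Int) : Option Int :=
  match best with
  | none => some p
  | some b => if p < b then some p else some b

theorem pvOccs_eq_nil (s : List Char) (n : Int) (c : Char) (h : c ∉ s) :
    pvOccs s n c = [] := by
  induction s generalizing n with
  | nil => rfl
  | cons x t ih =>
    simp only [List.mem_cons, not_or] at h
    simp only [pvOccs, if_neg (fun hx => h.1 (Eq.symm hx))]
    exact ih _ h.2

theorem pvOccs_ne_nil (s : List Char) (n : Int) (c : Char) (h : c ∈ s) :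
    pvOccs s n c ≠ [] := by
  induction s generalizing n with
  | nil => cases h
  | cons x t ih =>
    by_cases hx : x = c
    · simp [pvOccs, hx]
    · rcases List.mem_cons.mp h with h1 | h2
      · exact absurd (Eq.symm h1) hx
      · simpa [pvOccs, hx] using ih _ h2

theorem solutionDicStep_getD (d : PySem.Dict Char (List Int)) (w : Int) (x c : Char) :
    (solutionDicStep d w x).getD c [] =
      if c = x then d.getD x [] ++ [w + 1] else d.getD c [] := by
  unfold solutionDicStep
  by_cases hc : d.contains x
  · simp [hc, PySem.Dict.getD_insert]
  · simp only [Bool.not_eq_true] at hc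
    simp [hc, PySem.Dict.getD_insert, PySem.Dict.getD_of_not_contains d [] hc]

theorem solutionDicStep_contains (d : PySem.Dict Char (List Int)) (w : Int) (x c : Char) :
    (solutionDicStep d w x).contains c = (c == x || d.contains c) := by
  unfold solutionDicStep
  by_cases hc : d.contains x <;> simp [hc, PySem.Dict.contains_insert]

theorem innerA_getD (s : List Char) (n : Int) (d : PySem.Dict Char (List Int)) (c : Char) :
    ((PySem.List.enumerate s n).foldl (fun d p => solutionDicStep d p.1 p.2) d).getD c []
      = d.getD c [] ++ pvOccs s n c := by
  induction s generalizing n d with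
  | nil => simp [PySem.List.enumerate, pvOccs]
  | cons x t ih =>
    rw [PySem.List.enumerate_cons]
    simp only [List.foldl_cons, pvOccs]
    rw [ih, solutionDicStep_getD]
    by_cases hx : x = c
    · subst hx; simp
    · rw [if_neg (fun h => hx (Eq.symm h)), if_neg hx]

theorem innerA_contains (s : List Char) (n : Int) (d : PySem.Dict Char (List Int)) (c : Char) :
    ((PySem.List.enumerate s n).foldl (fun d p => solutionDicStep d p.1 p.2) d).contains c
      = (d.contains c || s.contains c) := by
  induction s generalizing n d with
  | nil => simp [PySem.List.enumerate]
  | cons x t ih =>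
    rw [PySem.List.enumerate_cons]
    simp only [List.foldl_cons]
    rw [ih, solutionDicStep_contains]
    by_cases hx : c = x
    · subst hx; simp
    · have hbeq : (c == x) = false := by simp [hx]
      simp [hbeq, hx, Bool.or_assoc]

-- A's dict-building double loop, rewritten as a structural fold over the rows
theorem solutionDic_eq (keymap : List String) :
    solutionDic keymap
      = keymap.foldl
          (fun d row =>
            (PySem.List.enumerate row.toList 0).foldl (fun d p => solutionDicStep d p.1 p.2) d)
          PySem.Dict.empty := by
  unfold solutionDic
  rw [PySem.List.foldl_pyRange_zero_pyGetD' keymap ""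
    (fun d row =>
      (PySem.List.pyRange 0 (PySem.Str.len row) 1).foldl
        (fun d w => solutionDicStep d w (PySem.List.pyGetD row.toList w ' ')) d)
    PySem.Dict.empty]
  have hfun :
      (fun (d : PySem.Dict Char (List Int)) (row : String) =>
        (PySem.List.pyRange 0 (PySem.Str.len row) 1).foldl
          (fun d w => solutionDicStep d w (PySem.List.pyGetD row.toList w ' ')) d)
        = (fun (d : PySem.Dict Char (List Int)) (row : String) =>
            (PySem.List.enumerate row.toList 0).foldl (fun d p => solutionDicStep d p.1 p.2) d) := by
    funext d row
    rw [PySem.List.enumerate_eq_map_pyRange row.toList ' ', List.foldl_map,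
      PySem.Str.len_eq, PySem.List.len_eq]
  rw [hfun]

theorem solutionDic_getD (keymap : List String) (c : Char) :
    (solutionDic keymap).getD c [] = keymap.flatMap (fun row => pvOccs row.toList 0 c) := by
  rw [solutionDic_eq]
  have : ∀ (km : List String) (d : PySem.Dict Char (List Int)),
      (km.foldl
          (fun d row =>
            (PySem.List.enumerate row.toList 0).foldl (fun d p => solutionDicStep d p.1 p.2) d)
          d).getD c []
        = d.getD c [] ++ km.flatMap (fun row => pvOccs row.toList 0 c) := by
    intro km
    induction km with
    | nil => simp
    | cons row rest ih =>
      intro d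
      simp only [List.foldl_cons, List.flatMap_cons]
      rw [ih, innerA_getD, List.append_assoc]
  rw [this, PySem.Dict.getD_empty, List.nil_append]

theorem solutionDic_contains (keymap : List String) (c : Char) :
    (solutionDic keymap).contains c = keymap.any (fun row => row.toList.contains c) := by
  rw [solutionDic_eq]
  have : ∀ (km : List String) (d : PySem.Dict Char (List Int)),
      (km.foldl
          (fun d row =>
            (PySem.List.enumerate row.toList 0).foldl (fun d p => solutionDicStep d p.1 p.2) d)
          d).contains c
        = (d.contains c || km.any (fun row => row.toList.contains c)) := by
    intro km
    induction km with
    | nil => simp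
    | cons row rest ih =>
      intro d
      simp only [List.foldl_cons, List.any_cons]
      rw [ih, innerA_contains, Bool.or_assoc]
  rw [this, PySem.Dict.contains_empty, Bool.false_or]

theorem pvF_absorb (acc : Option Int) (p q : Int) (h : p ≤ q) :
    pvF (pvF acc p) q = pvF acc p := by
  cases acc with
  | none => simp only [pvF]; rw [if_neg (by omega)]
  | some b =>
    simp only [pvF]
    by_cases hb : p < b
    · rw [if_pos hb]; simp only [pvF]; rw [if_neg (by omega)]
    · rw [if_neg hb]; simp only [pvF]; rw [if_neg (by omega)]

theorem pvOccs_foldl (s : List Char) (c : Char) (n : Int) (acc : Option Int) :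
    (pvOccs s n c).foldl pvF acc
      = if c ∈ s then pvF acc (n + 1 + (pvFirstIdx s c : Int)) else acc := by
  induction s generalizing n acc with
  | nil => simp [pvOccs]
  | cons x t ih =>
    by_cases hx : x = c
    · subst hx
      simp only [pvOccs, if_pos rfl, List.foldl_cons, List.mem_cons, true_or, if_pos,
        pvFirstIdx, Nat.cast_zero, add_zero]
      rw [ih]
      by_cases ht : x ∈ t
      · rw [if_pos ht, pvF_absorb _ _ _ (by push_cast; omega)]
      · rw [if_neg ht]
    · have hne : ¬ c = x := fun h => hx (Eq.symm h)
      have hmem : (c ∈ x :: t) ↔ (c ∈ t) := by simp [List.mem_cons, hne]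
      simp only [pvOccs, if_neg hx, pvFirstIdx]
      rw [ih]
      by_cases ht : c ∈ t
      · rw [if_pos ht, if_pos (hmem.mpr ht)]
        congr 1
        push_cast
        ring
      · rw [if_neg ht, if_neg (fun h => ht (hmem.mp h))]

theorem pvFirstIdx_spec (s : List Char) (c : Char) (h : c ∈ s) :
    s[pvFirstIdx s c]? = some c ∧ ∀ i < pvFirstIdx s c, s[i]? ≠ some c := by
  induction s with
  | nil => cases h
  | cons x t ih =>
    by_cases hx : x = c
    · subst hx; simp [pvFirstIdx]
    · rcases List.mem_cons.mp h with h1 | h2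
      · exact absurd (Eq.symm h1) hx
      · obtain ⟨h3, h4⟩ := ih h2
        refine ⟨by simpa [pvFirstIdx, hx] using h3, ?_⟩
        intro i hi
        cases i with
        | zero => simpa using fun hh => hx hh
        | succ i =>
          simp only [pvFirstIdx, if_neg hx] at hi
          simpa using h4 i (by omega)

theorem singleton_prefix_iff_head? (c : Char) (l : List Char) :
    [c] <+: l ↔ l.head? = some c := by
  cases l with
  | nil => simp
  | cons y u =>
    constructor
    · rintro ⟨t, ht⟩
      have : y = c := by
        have := congrArg List.head? ht
        simpa using Eq.symm this
      simp [this]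
    · intro hh
      simp only [List.head?_cons, Option.some.injEq] at hh
      exact ⟨u, by simp [hh]⟩

-- first-occurrence index: Python's row.find(c) is pvFirstIdx when c ∈ row
theorem find_singleton (s : List Char) (c : Char) (h : c ∈ s) :
    PySem.Chars.find s [c] = (pvFirstIdx s c : Int) := by
  have hinf : [c] <:+: s := (List.singleton_infix_iff c s).mpr h
  have hnn : 0 ≤ PySem.Chars.find s [c] := (PySem.Chars.find_nonneg_iff s [c]).mpr hinf
  obtain ⟨hpre, hmin⟩ := PySem.Chars.find_spec hnn
  obtain ⟨hget, hlt⟩ := pvFirstIdx_spec s c h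
  have hchar : ∀ i : Nat, ([c] <+: s.drop i) ↔ s[i]? = some c := by
    intro i
    rw [singleton_prefix_iff_head?, List.head?_drop]
  have h1 : (PySem.Chars.find s [c]).toNat = pvFirstIdx s c := by
    have ha : ¬ pvFirstIdx s c < (PySem.Chars.find s [c]).toNat := by
      intro hlt'
      exact (hmin _ hlt') ((hchar _).mpr hget)
    have hb : ¬ (PySem.Chars.find s [c]).toNat < pvFirstIdx s c := by
      intro hlt'
      exact hlt _ hlt' ((hchar _).mp hpre)
    omega
  omega

theorem foldl_pvF_some (t : List Int) (x : Int) :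
    t.foldl pvF (some x) = some (t.foldl min x) := by
  induction t generalizing x with
  | nil => rfl
  | cons y u ih =>
    simp only [List.foldl_cons]
    rw [show pvF (some x) y = some (min x y) from ?_, ih]
    simp only [pvF]
    rcases lt_trichotomy y x with h1 | h1 | h1
    · rw [if_pos h1]; congr 1; omega
    · subst h1; rw [if_neg (lt_irrefl _)]; congr 1; omega
    · rw [if_neg (by omega)]; congr 1; omega

-- min(l) for nonempty l is the pvF fold
theorem min_eq_pvF_fold (l : List Int) (h : l ≠ []) :
    some ((PySem.List.min? l (fun x => x)).getD 0) = l.foldl pvF none := by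
  cases l with
  | nil => exact absurd rfl h
  | cons x t =>
    rw [PySem.List.min?_id_cons]
    simp only [List.foldl_cons, Option.getD_some]
    rw [show pvF none x = some x from rfl, foldl_pvF_some]

theorem isIn_singleton_iff (c : Char) (row : String) :
    PySem.Str.isIn (String.ofList [c]) row = true ↔ c ∈ row.toList := by
  rw [PySem.Str.isIn_eq]
  have : (String.ofList [c]).toList = [c] := by simp
  rw [this, PySem.Chars.isIn_iff_infix, List.singleton_infix_iff]

-- B's row loop computes the pvF fold of all 1-based positions of ch
theorem solutionAltBest_eq (keymap : List String) (c : Char) :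
    solutionAltBest keymap c
      = (keymap.flatMap (fun row => pvOccs row.toList 0 c)).foldl pvF none := by
  unfold solutionAltBest
  generalize (none : Option Int) = acc
  induction keymap generalizing acc with
  | nil => simp
  | cons row rest ih =>
    simp only [List.foldl_cons, List.flatMap_cons, List.foldl_append]
    rw [← ih]
    congr 1
    rw [pvOccs_foldl]
    by_cases hc : c ∈ row.toList
    · rw [if_pos hc, if_pos ((isIn_singleton_iff c row).mpr hc)]
      rw [PySem.Str.find_eq, show (String.ofList [c]).toList = [c] by simp,
        find_singleton row.toList c hc]
      show pvF acc ((pvFirstIdx row.toList c : Int) + 1) = pvF acc (0 + 1 + (pvFirstIdx row.toList c : Int))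
      congr 1
      ring
    · rw [if_neg hc]
      rw [if_neg (fun h => hc ((isIn_singleton_iff c row).mp h))]

theorem loops_eq (keymap : List String) (s : List Char) (r : Int) :
    solutionLoop (solutionDic keymap) s r = solutionAltLoop keymap s r := by
  induction s generalizing r with
  | nil => rfl
  | cons j rest ih =>
    simp only [solutionLoop, solutionAltLoop]
    by_cases hc : (solutionDic keymap).contains j = true
    · rw [if_pos hc]
      have hany : keymap.any (fun row => row.toList.contains j) = true := by
        rw [← solutionDic_contains]; exact hc
      have hne : (solutionDic keymap).getD j [] ≠ [] := by
        rw [solutionDic_getD]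
        simp only [List.any_eq_true] at hany
        obtain ⟨row, hrow, hcj⟩ := hany
        intro hnil
        exact pvOccs_ne_nil row.toList 0 j (by simpa using hcj)
          (List.flatMap_eq_nil_iff.mp hnil row hrow)
      have hbest : solutionAltBest keymap j
          = some (((PySem.List.min? ((solutionDic keymap).getD j []) (fun x => x)).getD 0)) := by
        rw [solutionAltBest_eq, ← solutionDic_getD, ← min_eq_pvF_fold _ hne]
      rw [hbest, ih]
    · rw [if_neg hc]
      simp only [Bool.not_eq_true] at hc
      have hbest : solutionAltBest keymap j = none := by
        rw [solutionAltBest_eq]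
        have hnil : keymap.flatMap (fun row => pvOccs row.toList 0 j) = [] := by
          rw [solutionDic_contains] at hc
          simp only [List.any_eq_false] at hc
          exact List.flatMap_eq_nil_iff.mpr
            (fun row hrow => pvOccs_eq_nil row.toList 0 j (by simpa using hc row hrow))
        rw [hnil]
        rfl
      rw [hbest]

-- ===== VERDICT (by name: the statement is the Claim_ definition above) =====
theorem solution_spec : Claim_equal_solution := by
  intro keymap targets _
  unfold Spec_solution solution solution_alt
  simp only [PySem.List.foldl_append_singleton_eq_map, List.nil_append]
  exact List.map_congr_left (fun t _ => loops_eq keymap t.toList 0)
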